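-- pv_equiv track=rewrite | github.com/SAKTHIVEL280/training-placement-2 | 28-06-2025/gfg_number pattern.py | printPat
-- ===== SOURCE A (Python) =====
-- def printPat(n):
--     #write code here
--     result = []
--     N = n
--     count = 0
--     for i in range(n):
--         x = n
--         m = n - count
--         counter = 0
--         for j in range(n*N):
--             result.append(x)
--             counter+=1
--             if counter == m:
--                 x = x -1
--                 counter = 0
--         N = N - 1
--         result.append(-1)
--         count+=1
--     return result
-- ===== SOURCE B (Python) =====
-- def printPat(n):
--     result = []
--     for i in range(n):
--         m = n - i
--         for k in range(n, 0, -1):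
--             result.extend([k] * m)
--         result.append(-1)
--     return result
-- ===== Notes on version B (the rewrite author's own statement) =====
-- stated objective: simpler
-- what changed: B computes each row's run length m = n - i directly and emits each descending value as a single extend of m copies, replacing A's flat range(n*N) loop with its manual counter/threshold/decrement state machine.
import Mathlib
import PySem

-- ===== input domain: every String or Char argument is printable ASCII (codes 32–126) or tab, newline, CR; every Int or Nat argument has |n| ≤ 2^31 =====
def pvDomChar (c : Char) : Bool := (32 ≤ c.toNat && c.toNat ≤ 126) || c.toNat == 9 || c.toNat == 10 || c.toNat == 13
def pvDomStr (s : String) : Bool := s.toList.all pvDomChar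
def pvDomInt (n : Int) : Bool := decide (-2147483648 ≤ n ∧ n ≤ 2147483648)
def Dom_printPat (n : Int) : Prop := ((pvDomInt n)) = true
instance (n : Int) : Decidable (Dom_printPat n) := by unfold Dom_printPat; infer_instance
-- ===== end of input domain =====

-- B replaces A's flat range(n*N) loop with counter/threshold state by directly emitting each run [k]*m; objective: simpler.

-- ===== PORT A =====
-- inner-loop body of A, named so the proof can speak about it (state = (result, x, counter))
def pvInnerStep (m : Int) (s : List Int × Int × Int) : List Int × Int × Int :=
  let res := s.1 ++ [s.2.1]
  let counter := s.2.2 + 1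
  if counter = m then (res, s.2.1 - 1, 0) else (res, s.2.1, counter)

def printPat (n : Int) : List Int :=
  -- outer state = (result, N, count)
  ((PySem.List.pyRange 0 n 1).foldl (fun (st : List Int × Int × Int) _i =>
    let result := st.1
    let N := st.2.1
    let count := st.2.2
    let x := n
    let m := n - count
    let inner := (PySem.List.pyRange 0 (n * N) 1).foldl
      (fun s _j => pvInnerStep m s) (result, x, 0)
    (inner.1 ++ [-1], N - 1, count + 1)) ([], n, 0)).1

-- ===== PORT B =====
def printPat_alt (n : Int) : List Int :=
  (PySem.List.pyRange 0 n 1).foldl (fun result i =>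
    let m := n - i
    ((PySem.List.pyRange n 0 (-1)).foldl
      (fun r k => r ++ List.replicate m.toNat k) result) ++ [-1]) []

-- ===== PRECONDITION & SPEC =====
def Spec_printPat (n : Int) (out : List Int) : Prop := out = printPat_alt n
instance (n : Int) (out : List Int) : Decidable (Spec_printPat n out) := by unfold Spec_printPat; infer_instance

-- ===== CLAIM (what is proved, stated in full; the proofs are below) =====
def Claim_equal_printPat : Prop := ∀ (n : Int), Dom_printPat n → Spec_printPat n (printPat n)

-- ===== LEMMAS AND PROOFS =====

-- a foldl that ignores the list elements is an iterate
theorem pv_foldl_const {α β : Type} (f : α → α) (init : α) (l : List β) :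
    l.foldl (fun s _ => f s) init = f^[l.length] init := by
  induction l generalizing init with
  | nil => simp
  | cons b t ih => simp [List.foldl_cons, ih, Function.iterate_succ_apply]

-- appending folds flatten
theorem pv_foldl_append {α β : Type} (f : β → List α) (l : List β) (res : List α) :
    l.foldl (fun r k => r ++ f k) res = res ++ l.flatMap f := by
  induction l generalizing res with
  | nil => simp
  | cons b t ih => simp [List.foldl_cons, ih]

-- one run of A's inner loop: c steps from counter m - c emit x, c times, then decrement
theorem pv_run (m : Int) (c : Nat) (hc : 0 < c) (hcm : (c : Int) ≤ m) :
    ∀ (res : List Int) (x : Int),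
    (pvInnerStep m)^[c] (res, x, m - c) = (res ++ List.replicate c x, x - 1, 0) := by
  induction c with
  | zero => omega
  | succ c ih =>
    intro res x
    rcases Nat.eq_zero_or_pos c with h0 | hpos
    · subst h0
      show pvInnerStep m (res, x, m - ((0 + 1 : Nat) : Int)) = (res ++ List.replicate (0 + 1) x, x - 1, 0)
      simp only [pvInnerStep]
      rw [if_pos (show m - ((0 + 1 : Nat) : Int) + 1 = m by push_cast; ring)]
      rfl
    · rw [Function.iterate_succ_apply]
      have hne : m - ((c + 1 : Nat) : Int) + 1 ≠ m := by push_cast; omega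
      have hstep : pvInnerStep m (res, x, m - ((c + 1 : Nat) : Int)) = (res ++ [x], x, m - (c : Int)) := by
        simp only [pvInnerStep]
        rw [if_neg hne]
        simp only [Prod.mk.injEq, true_and]
        push_cast; ring
      rw [hstep, ih hpos (by push_cast at hcm ⊢; omega) (res ++ [x]) x]
      simp [List.replicate_succ]

-- t full runs of length m.toNat: emits replicate m x, replicate m (x-1), …
theorem pv_runs (m : Int) (hm : 0 < m) (t : Nat) :
    ∀ (res : List Int) (x : Int),
    (pvInnerStep m)^[t * m.toNat] (res, x, 0) =
      (res ++ (List.range t).flatMap (fun j : Nat => List.replicate m.toNat (x - (j:Int))), x - (t:Int), 0) := by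
  induction t with
  | zero => intro res x; simp
  | succ t ih =>
    intro res x
    have hmt : ((m.toNat : Int)) = m := Int.toNat_of_nonneg (le_of_lt hm)
    have h1 : (t + 1) * m.toNat = t * m.toNat + m.toNat := by ring
    rw [h1, Function.iterate_add_apply]
    have hfirst := pv_run m m.toNat (by omega) (by omega) res x
    have h0 : m - ((m.toNat : Int)) = 0 := by omega
    rw [h0] at hfirst
    rw [hfirst, ih (res ++ List.replicate m.toNat x) (x - 1)]
    simp only [Prod.mk.injEq, and_true]
    refine ⟨?_, by push_cast; ring⟩
    rw [List.range_succ_eq_map]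
    simp only [List.flatMap_cons, List.flatMap_map]
    have hf : (fun j : Nat => List.replicate m.toNat (x - ((j.succ : Nat) : Int))) =
        (fun j : Nat => List.replicate m.toNat (x - 1 - (j : Int))) := by
      funext j; congr 1; push_cast; ring
    simp only [hf]
    simp

-- the value of one row: n, n-1, …, 1, each repeated m times
def pvRow (n m : Int) : List Int :=
  (List.range n.toNat).flatMap (fun j : Nat => List.replicate m.toNat (n - (j:Int)))

theorem pv_brow (n m : Int) (res : List Int) :
    (PySem.List.pyRange n 0 (-1)).foldl (fun r k => r ++ List.replicate m.toNat k) res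
      = res ++ pvRow n m := by
  rw [pv_foldl_append, PySem.List.pyRange_neg_one]
  rw [List.flatMap_map]
  simp [pvRow]

theorem pv_arow (n N count : Int) (hN : n * N = n * (n - count)) (hm : 0 < n - count)
    (res : List Int) :
    ((PySem.List.pyRange 0 (n * N) 1).foldl
      (fun s _j => pvInnerStep (n - count) s) (res, n, 0)).1 = res ++ pvRow n (n - count) := by
  by_cases hn : 0 < n
  · have hlen : (PySem.List.pyRange 0 (n * N) 1).length = n.toNat * (n - count).toNat := by
      rw [PySem.List.length_pyRange_one, hN]
      have h1 : ((n.toNat : Int)) = n := Int.toNat_of_nonneg (le_of_lt hn)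
      have h2 : (((n - count).toNat : Int)) = n - count := Int.toNat_of_nonneg (le_of_lt hm)
      have h3 : n * (n - count) - 0 = ((n.toNat * (n - count).toNat : Nat) : Int) := by
        push_cast; rw [h1, h2]; ring
      rw [h3, Int.toNat_natCast]
    rw [pv_foldl_const, hlen, pv_runs (n - count) hm n.toNat res n]
    rfl
  · have hnn : n.toNat = 0 := by omega
    have hprod : n * N ≤ 0 := by nlinarith [hN]
    rw [PySem.List.pyRange_one_eq_nil (by omega)]
    simp [pvRow, hnn]

-- the outer loops over List.range k keep states aligned: A's state is (B's acc, n - k, k)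
theorem pv_outer (n : Int) (_hn : 0 < n) (k : Nat) (hk : (k : Int) ≤ n) :
    (List.range k).foldl (fun (st : List Int × Int × Int) (_i : Nat) =>
        let result := st.1
        let N := st.2.1
        let count := st.2.2
        let x := n
        let m := n - count
        let inner := (PySem.List.pyRange 0 (n * N) 1).foldl
          (fun s _j => pvInnerStep m s) (result, x, 0)
        (inner.1 ++ [-1], N - 1, count + 1)) ([], n, 0)
      = ((List.range k).foldl (fun acc (j : Nat) => acc ++ pvRow n (n - (j:Int)) ++ [-1]) [],
         n - (k:Int), (k : Int)) := by
  induction k with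
  | zero => simp
  | succ k ih =>
    have hk' : (k : Int) ≤ n := by push_cast at hk ⊢; omega
    rw [List.range_succ, List.foldl_append, List.foldl_append, ih hk']
    simp only [List.foldl_cons, List.foldl_nil]
    have hm : 0 < n - (k : Int) := by push_cast at hk; omega
    rw [pv_arow n (n - (k:Int)) (k:Int) rfl hm]
    simp only [Prod.mk.injEq, true_and]
    refine ⟨by push_cast; ring, by push_cast; ring⟩

-- ===== VERDICT (by name: the statement is the Claim_ definition above) =====
theorem printPat_spec : Claim_equal_printPat := by
  intro n _
  unfold Spec_printPat printPat printPat_alt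
  by_cases hn : 0 < n
  · have hrange : PySem.List.pyRange 0 n 1 = (List.range n.toNat).map (fun k : Nat => ((k : Int))) := by
      rw [PySem.List.pyRange_one]; simp
    rw [hrange, List.foldl_map, List.foldl_map]
    have hA := pv_outer n hn n.toNat (by omega)
    rw [hA]
    have hfun : (fun (acc : List Int) (j : Nat) =>
        ((PySem.List.pyRange n 0 (-1)).foldl
          (fun r k => r ++ List.replicate (n - ((j : Int))).toNat k) acc) ++ [-1])
        = (fun (acc : List Int) (j : Nat) => acc ++ pvRow n (n - (j:Int)) ++ [-1]) := by
      funext acc j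
      rw [pv_brow n (n - (j:Int)) acc]
    simp only [hfun]
  · rw [PySem.List.pyRange_one_eq_nil (by omega)]
    simp
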